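-- pv_equiv track=rewrite | github.com/Pmiguelbm/Python-Estudos | web/web2.py | verifica_cadastro
-- ===== SOURCE A (Python) =====
-- def verifica_cadastro(nome, idade):
--   nome = nome.lower()
--   alfabeto = ['a', 'b', 'c', 'd', 'e', 'f', 'g', 'h', 'i', 'j', 'k', 'l', 'm', 'n', 'o', 'p', 'q', 'r', 's', 't', 'u', 'v', 'w', 'x', 'y', 'z',' ']
--   valida = True
--   for letra in nome:
--     if letra not in alfabeto:
--         valida = False
--   if valida == True and idade.isdigit():
--     return True
--   else:
--     return False
-- ===== SOURCE B (Python) =====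
-- def verifica_cadastro(nome, idade):
--     letras = nome.replace(' ', '')
--     return (letras == '' or letras.isalpha()) and idade.isdigit()
-- ===== Notes on version B (the rewrite author's own statement) =====
-- stated objective: faster
-- what changed: Instead of lowercasing and scanning every character against a 27-element alphabet list with a mutable valida flag, B deletes the spaces from the name once with str.replace and decides validity with a single isalpha call on the remainder (empty remainder allowed), combined with isdigit.
import Mathlib
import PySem

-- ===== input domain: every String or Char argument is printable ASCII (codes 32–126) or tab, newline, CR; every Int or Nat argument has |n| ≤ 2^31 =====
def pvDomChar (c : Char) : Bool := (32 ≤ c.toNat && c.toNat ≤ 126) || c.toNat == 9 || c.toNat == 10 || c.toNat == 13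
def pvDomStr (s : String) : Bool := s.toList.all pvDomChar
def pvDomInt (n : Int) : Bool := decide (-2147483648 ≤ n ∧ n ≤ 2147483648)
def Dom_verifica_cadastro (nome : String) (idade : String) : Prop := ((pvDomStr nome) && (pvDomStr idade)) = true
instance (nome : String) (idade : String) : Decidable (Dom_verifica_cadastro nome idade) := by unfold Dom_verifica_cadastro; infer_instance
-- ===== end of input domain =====

-- B drops A's per-character scan against an alphabet list: it deletes the spaces once and asks one isalpha question (simpler; return value only).

-- ===== PORT A =====
def verifica_cadastro (nome : String) (idade : String) : Bool :=
  let nome' := PySem.Str.lower nome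
  let alfabeto : List Char := ['a','b','c','d','e','f','g','h','i','j','k','l','m','n','o','p','q','r','s','t','u','v','w','x','y','z',' ']
  let valida := nome'.toList.foldl (fun valida letra => if letra ∉ alfabeto then false else valida) true
  if (valida == true) && PySem.Str.strIsdigit idade then true else false

-- ===== PORT B =====
def verifica_cadastro_alt (nome : String) (idade : String) : Bool :=
  let letras := PySem.Str.replace nome " " ""
  (letras == "" || PySem.Str.strIsalpha letras) && PySem.Str.strIsdigit idade

-- ===== PRECONDITION & SPEC =====
def Spec_verifica_cadastro (nome : String) (idade : String) (out : Bool) : Prop := out = verifica_cadastro_alt nome idade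
instance (nome : String) (idade : String) (out : Bool) : Decidable (Spec_verifica_cadastro nome idade out) := by unfold Spec_verifica_cadastro; infer_instance

-- ===== CLAIM (what is proved, stated in full; the proofs are below) =====
def Claim_equal_verifica_cadastro : Prop := ∀ (nome : String) (idade : String), Dom_verifica_cadastro nome idade → Spec_verifica_cadastro nome idade (verifica_cadastro nome idade)

-- ===== LEMMAS AND PROOFS =====

theorem flag_foldl (alfa : List Char) :
    ∀ (l : List Char) (b : Bool),
      l.foldl (fun valida letra => if letra ∉ alfa then false else valida) b
        = (b && l.all (· ∈ alfa)) := by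
  intro l
  induction l with
  | nil => intro b; simp
  | cons c l ih =>
      intro b
      simp only [List.foldl_cons, List.all_cons]
      by_cases h : c ∈ alfa
      · rw [if_neg (by simpa using h), ih]; simp [h]
      · rw [if_pos (by simpa using h), ih]; simp [h]

theorem char_eq_iff (c d : Char) : c = d ↔ c.toNat = d.toNat := by
  constructor
  · rintro rfl; rfl
  · intro h; apply Char.ext; exact UInt32.toNat_inj.mp h

theorem char_le_iff (c d : Char) : c ≤ d ↔ c.toNat ≤ d.toNat := by
  rw [Char.le_def]
  exact UInt32.le_iff_toNat_le

theorem go_filter (fuel : Nat) :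
    ∀ (l acc : List Char), l.length ≤ fuel →
      PySem.Chars.replace.go [' '] [] fuel l acc
        = acc.reverse ++ l.filter (fun c => !(c == ' ')) := by
  induction fuel with
  | zero =>
      intro l acc h
      have : l = [] := List.eq_nil_of_length_eq_zero (Nat.le_zero.mp h)
      subst this
      simp [PySem.Chars.replace.go]
  | succ fuel ih =>
      intro l acc h
      cases l with
      | nil => simp [PySem.Chars.replace.go]
      | cons c t =>
          rw [PySem.Chars.replace.go]
          simp only [List.length_cons] at h
          by_cases hc : c = ' '
          · subst hc
            rw [if_pos (by simp only [List.isPrefixOf, BEq.rfl, Bool.true_and])]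
            rw [show List.drop ([' '] : List Char).length (' ' :: t) = t from rfl]
            simp only [List.reverse_nil, List.nil_append]
            rw [ih t acc (by omega)]
            simp
          · rw [if_neg (by
              simp only [List.isPrefixOf, Bool.and_eq_true, beq_iff_eq]
              exact fun hx => hc hx.1.symm)]
            rw [ih t (c :: acc) (by omega)]
            simp [hc]

theorem replace_space (cs : List Char) :
    PySem.Chars.replace cs [' '] [] = cs.filter (fun c => !(c == ' ')) := by
  rw [PySem.Chars.replace]
  rw [if_neg (by simp)]
  exact go_filter cs.length cs [] le_rfl

theorem mem_alfabeto (c : Char) :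
    c ∈ (['a','b','c','d','e','f','g','h','i','j','k','l','m','n','o','p','q','r','s','t','u','v','w','x','y','z',' '] : List Char)
      ↔ (97 ≤ c.toNat ∧ c.toNat ≤ 122) ∨ c.toNat = 32 := by
  simp only [List.mem_cons, List.not_mem_nil, or_false, char_eq_iff,
    (show ('a').toNat = 97 from rfl), (show ('b').toNat = 98 from rfl), (show ('c').toNat = 99 from rfl), (show ('d').toNat = 100 from rfl), (show ('e').toNat = 101 from rfl), (show ('f').toNat = 102 from rfl), (show ('g').toNat = 103 from rfl), (show ('h').toNat = 104 from rfl), (show ('i').toNat = 105 from rfl), (show ('j').toNat = 106 from rfl), (show ('k').toNat = 107 from rfl), (show ('l').toNat = 108 from rfl), (show ('m').toNat = 109 from rfl), (show ('n').toNat = 110 from rfl), (show ('o').toNat = 111 from rfl), (show ('p').toNat = 112 from rfl), (show ('q').toNat = 113 from rfl), (show ('r').toNat = 114 from rfl), (show ('s').toNat = 115 from rfl), (show ('t').toNat = 116 from rfl), (show ('u').toNat = 117 from rfl), (show ('v').toNat = 118 from rfl), (show ('w').toNat = 119 from rfl), (show ('x').toNat = 120 from rfl), (show ('y').toNat = 121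 from rfl), (show ('z').toNat = 122 from rfl), (show (' ').toNat = 32 from rfl)]
  omega

theorem lowerChar_toNat (c : Char) (h : pvDomChar c = true) :
    (PySem.Chars.lowerChar c).toNat
      = if 65 ≤ c.toNat ∧ c.toNat ≤ 90 then c.toNat + 32 else c.toNat := by
  rw [PySem.Chars.lowerChar]
  have hu' : PySem.Chars.isupper c = true ↔ (65 ≤ c.toNat ∧ c.toNat ≤ 90) := by
    simp [PySem.Chars.isupper, char_le_iff, (show ('A').toNat = 65 from rfl),
      (show ('Z').toNat = 90 from rfl)]
  by_cases hb : 65 ≤ c.toNat ∧ c.toNat ≤ 90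
  · rw [if_pos (hu'.mpr hb), if_pos hb]
    have hv : (c.toNat + 32).isValidChar := by
      constructor; omega
    simp [Char.ofNat, hv]
  · rw [if_neg (fun hx => hb (hu'.mp hx)), if_neg hb]

theorem pointwise (c : Char) (h : pvDomChar c = true) :
    (PySem.Chars.lowerChar c ∈ (['a','b','c','d','e','f','g','h','i','j','k','l','m','n','o','p','q','r','s','t','u','v','w','x','y','z',' '] : List Char))
      ↔ (c = ' ' ∨ PySem.Chars.isalpha c = true) := by
  have hl := lowerChar_toNat c h
  have hsp : (c = ' ') ↔ (c.toNat = 32) := by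
    rw [char_eq_iff]; rfl
  have hal : (PySem.Chars.isalpha c = true)
      ↔ ((65 ≤ c.toNat ∧ c.toNat ≤ 90) ∨ (97 ≤ c.toNat ∧ c.toNat ≤ 122)) := by
    simp [PySem.Chars.isalpha, PySem.Chars.isupper, PySem.Chars.islower, char_le_iff,
      (show ('A').toNat = 65 from rfl), (show ('Z').toNat = 90 from rfl),
      (show ('a').toNat = 97 from rfl), (show ('z').toNat = 122 from rfl)]
  rw [mem_alfabeto, hl, hsp, hal]
  split_ifs <;> omega

theorem empty_or_isalpha (ls : List Char) :
    ((ls == ([] : List Char)) || (!ls.isEmpty && ls.all PySem.Chars.isalpha))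
      = ls.all PySem.Chars.isalpha := by
  cases ls <;> simp

-- ===== VERDICT (by name: the statement is the Claim_ definition above) =====
theorem verifica_cadastro_spec : Claim_equal_verifica_cadastro := by
  intro nome idade hdom
  have hn : ∀ c ∈ nome.toList, pvDomChar c = true := by
    simp only [Dom_verifica_cadastro, pvDomStr, Bool.and_eq_true, List.all_eq_true] at hdom
    exact hdom.1
  unfold Spec_verifica_cadastro verifica_cadastro verifica_cadastro_alt
  simp only [flag_foldl, Bool.true_and]
  have hB : ((PySem.Str.replace nome " " "" == "")
        || PySem.Str.strIsalpha (PySem.Str.replace nome " " "")) =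
      (nome.toList.filter (fun c => !(c == ' '))).all PySem.Chars.isalpha := by
    have hls : (PySem.Str.replace nome " " "").toList
        = nome.toList.filter (fun c => !(c == ' ')) := by
      simp only [PySem.Str.replace]
      rw [String.toList_ofList]
      exact replace_space nome.toList
    rw [PySem.Str.strIsalpha, PySem.Chars.strIsalpha, hls]
    have he : (PySem.Str.replace nome " " "" == "")
        = ((nome.toList.filter (fun c => !(c == ' '))) == ([] : List Char)) := by
      rcases h : (PySem.Str.replace nome " " "" == "") with _ | _
      · symm
        simp only [beq_eq_false_iff_ne, ne_eq] at h ⊢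
        intro hnil
        exact h (by apply String.ext; simpa [hls] using hnil)
      · symm
        simp only [beq_iff_eq] at h ⊢
        rw [← hls, h]
        rfl
    rw [he]
    exact empty_or_isalpha _
  rw [hB]
  have hA : (PySem.Str.lower nome).toList.all
        (· ∈ (['a','b','c','d','e','f','g','h','i','j','k','l','m','n','o','p','q','r','s','t','u','v','w','x','y','z',' '] : List Char))
      = (nome.toList.filter (fun c => !(c == ' '))).all PySem.Chars.isalpha := by
    rw [Bool.eq_iff_iff]
    simp only [PySem.Str.toList_lower, PySem.Chars.lower, List.all_eq_true, List.mem_map,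
      List.mem_filter, decide_eq_true_eq, Bool.not_eq_eq_eq_not, Bool.not_true,
      beq_eq_false_iff_ne, ne_eq, forall_exists_index, and_imp]
    constructor
    · intro hall c hc hcsp
      have := hall _ c hc rfl
      rcases (pointwise c (hn c hc)).mp this with h | h
      · exact absurd h hcsp
      · exact h
    · intro hall x c hc hx
      subst hx
      apply (pointwise c (hn c hc)).mpr
      by_cases hcs : c = ' '
      · exact Or.inl hcs
      · exact Or.inr (hall c hc hcs)
  rw [hA]
  cases (nome.toList.filter (fun c => !(c == ' '))).all PySem.Chars.isalpha <;>
    cases PySem.Str.strIsdigit idade <;> simp
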